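-- pv_equiv track=rewrite | github.com/flynnswalker/mra2-decon | tools/shrine_password_gen.py | extract_sub_breed_index
-- ===== SOURCE A (Python) =====
-- def extract_sub_breed_index(raw):
--     """
--     Extract 8-bit sub breed table index from raw hash.
--     ROM: 0x0801E82C - extracts ODD-positioned bits (1,3,5,...,15).
--
--     The ASM shifts raw right FIRST, then masks with ascending bit weights.
--     """
--     result = 0
--     temp = raw
--     weight = 1
--     for _ in range(8):
--         temp >>= 1  # shift first
--         result |= (temp & weight)
--         weight <<= 1
--     return result & 0xFF
-- ===== SOURCE B (Python) =====
-- def extract_sub_breed_index(raw):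
--     # Closed-form bit de-interleave: gather odd-positioned bits 1,3,...,15 into bits 0..7.
--     x = (raw >> 1) & 0x5555
--     x = (x | (x >> 1)) & 0x3333
--     x = (x | (x >> 2)) & 0x0F0F
--     x = (x | (x >> 4)) & 0x00FF
--     return x
-- ===== Notes on version B (the rewrite author's own statement) =====
-- stated objective: simpler
-- what changed: Replaced the per-bit shift/accumulate loop with its running temp/weight/result state by a closed-form parallel bit de-interleave: one mask isolates the odd-positioned bits, then three magic-mask fold steps compact them.
import Mathlib
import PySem

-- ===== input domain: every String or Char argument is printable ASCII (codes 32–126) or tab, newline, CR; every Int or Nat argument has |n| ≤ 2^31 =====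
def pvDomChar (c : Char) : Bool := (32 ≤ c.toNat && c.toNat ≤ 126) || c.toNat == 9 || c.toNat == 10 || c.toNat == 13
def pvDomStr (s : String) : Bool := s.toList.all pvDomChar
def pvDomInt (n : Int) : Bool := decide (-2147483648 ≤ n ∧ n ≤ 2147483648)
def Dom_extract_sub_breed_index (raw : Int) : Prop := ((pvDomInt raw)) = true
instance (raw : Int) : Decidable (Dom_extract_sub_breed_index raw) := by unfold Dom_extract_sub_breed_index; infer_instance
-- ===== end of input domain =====

-- B replaces A's 8-iteration shift/mask loop with a closed-form parallel bit de-interleave (magic-mask folds); return value equivalence, no side effects.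

-- ===== PORT A =====
-- Python & | << >> are ported as Mathlib's Int.land / Int.lor and core's <<< / >>> (Nat shift
-- amounts), which are exact for Python's infinite two's-complement semantics on all Ints.
def extract_sub_breed_index (raw : Int) : Int :=
  let s := (PySem.List.pyRange 0 8 1).foldl
    (fun (st : Int × Int × Int) _ =>
      let temp := st.2.1 >>> (1:Nat)
      let result := Int.lor st.1 (Int.land temp st.2.2)
      let weight := st.2.2 <<< (1:Nat)
      (result, temp, weight))
    (0, raw, 1)
  Int.land s.1 255

-- ===== PORT B =====
def extract_sub_breed_index_alt (raw : Int) : Int :=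
  let x1 := Int.land (raw >>> (1:Nat)) 21845
  let x2 := Int.land (Int.lor x1 (x1 >>> (1:Nat))) 13107
  let x3 := Int.land (Int.lor x2 (x2 >>> (2:Nat))) 3855
  Int.land (Int.lor x3 (x3 >>> (4:Nat))) 255

-- ===== PRECONDITION & SPEC =====
def Spec_extract_sub_breed_index (raw : Int) (out : Int) : Prop := out = extract_sub_breed_index_alt raw
instance (raw : Int) (out : Int) : Decidable (Spec_extract_sub_breed_index raw out) := by unfold Spec_extract_sub_breed_index; infer_instance

-- ===== CLAIM (what is proved, stated in full; the proofs are below) =====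
def Claim_equal_extract_sub_breed_index : Prop := ∀ (raw : Int), Dom_extract_sub_breed_index raw → Spec_extract_sub_breed_index raw (extract_sub_breed_index raw)

-- ===== LEMMAS AND PROOFS =====

theorem pv_tbsr (x : Int) (k i : Nat) : (x >>> k).testBit i = x.testBit (k + i) := by
  cases x with
  | ofNat n =>
      rw [show (Int.ofNat n) >>> k = Int.ofNat (n >>> k) from rfl]
      simp [Int.testBit, Nat.testBit_shiftRight]
  | negSucc n =>
      rw [show (Int.negSucc n) >>> k = Int.negSucc (n >>> k) from rfl]
      simp [Int.testBit, Nat.testBit_shiftRight]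

theorem pv_tb0 (i : Nat) : (0:Int).testBit i = false := by
  show Nat.testBit 0 i = false
  simp

theorem pv_tb255_high (i : Nat) (h : 8 ≤ i) : (255:Int).testBit i = false := by
  show Nat.testBit 255 i = false
  exact Nat.testBit_eq_false_of_lt (lt_of_lt_of_le (by norm_num) (Nat.pow_le_pow_right (by norm_num) h))

theorem pv_land255_nonneg (x : Int) : 0 ≤ Int.land x 255 := by
  cases x <;> simp [Int.land]

theorem pv_toNat_testBit {x : Int} (h : 0 ≤ x) (i : Nat) : x.toNat.testBit i = x.testBit i := by
  cases x with
  | ofNat n => rfl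
  | negSucc n => exact absurd h (by simp)

theorem pvMb_21845_0 : (21845:Int).testBit 0 = true := by decide
theorem pvMb_21845_1 : (21845:Int).testBit 1 = false := by decide
theorem pvMb_21845_2 : (21845:Int).testBit 2 = true := by decide
theorem pvMb_21845_3 : (21845:Int).testBit 3 = false := by decide
theorem pvMb_21845_4 : (21845:Int).testBit 4 = true := by decide
theorem pvMb_21845_5 : (21845:Int).testBit 5 = false := by decide
theorem pvMb_21845_6 : (21845:Int).testBit 6 = true := by decide
theorem pvMb_21845_7 : (21845:Int).testBit 7 = false := by decide
theorem pvMb_21845_8 : (21845:Int).testBit 8 = true := by decide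
theorem pvMb_21845_9 : (21845:Int).testBit 9 = false := by decide
theorem pvMb_21845_10 : (21845:Int).testBit 10 = true := by decide
theorem pvMb_21845_11 : (21845:Int).testBit 11 = false := by decide
theorem pvMb_21845_12 : (21845:Int).testBit 12 = true := by decide
theorem pvMb_21845_13 : (21845:Int).testBit 13 = false := by decide
theorem pvMb_21845_14 : (21845:Int).testBit 14 = true := by decide
theorem pvMb_13107_0 : (13107:Int).testBit 0 = true := by decide
theorem pvMb_13107_1 : (13107:Int).testBit 1 = true := by decide
theorem pvMb_13107_2 : (13107:Int).testBit 2 = false := by decide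
theorem pvMb_13107_3 : (13107:Int).testBit 3 = false := by decide
theorem pvMb_13107_4 : (13107:Int).testBit 4 = true := by decide
theorem pvMb_13107_5 : (13107:Int).testBit 5 = true := by decide
theorem pvMb_13107_6 : (13107:Int).testBit 6 = false := by decide
theorem pvMb_13107_7 : (13107:Int).testBit 7 = false := by decide
theorem pvMb_13107_8 : (13107:Int).testBit 8 = true := by decide
theorem pvMb_13107_9 : (13107:Int).testBit 9 = true := by decide
theorem pvMb_13107_10 : (13107:Int).testBit 10 = false := by decide
theorem pvMb_13107_11 : (13107:Int).testBit 11 = false := by decide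
theorem pvMb_13107_12 : (13107:Int).testBit 12 = true := by decide
theorem pvMb_13107_13 : (13107:Int).testBit 13 = true := by decide
theorem pvMb_3855_0 : (3855:Int).testBit 0 = true := by decide
theorem pvMb_3855_1 : (3855:Int).testBit 1 = true := by decide
theorem pvMb_3855_2 : (3855:Int).testBit 2 = true := by decide
theorem pvMb_3855_3 : (3855:Int).testBit 3 = true := by decide
theorem pvMb_3855_4 : (3855:Int).testBit 4 = false := by decide
theorem pvMb_3855_5 : (3855:Int).testBit 5 = false := by decide
theorem pvMb_3855_6 : (3855:Int).testBit 6 = false := by decide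
theorem pvMb_3855_7 : (3855:Int).testBit 7 = false := by decide
theorem pvMb_3855_8 : (3855:Int).testBit 8 = true := by decide
theorem pvMb_3855_9 : (3855:Int).testBit 9 = true := by decide
theorem pvMb_3855_10 : (3855:Int).testBit 10 = true := by decide
theorem pvMb_3855_11 : (3855:Int).testBit 11 = true := by decide
theorem pvMb_255_0 : (255:Int).testBit 0 = true := by decide
theorem pvMb_255_1 : (255:Int).testBit 1 = true := by decide
theorem pvMb_255_2 : (255:Int).testBit 2 = true := by decide
theorem pvMb_255_3 : (255:Int).testBit 3 = true := by decide
theorem pvMb_255_4 : (255:Int).testBit 4 = true := by decide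
theorem pvMb_255_5 : (255:Int).testBit 5 = true := by decide
theorem pvMb_255_6 : (255:Int).testBit 6 = true := by decide
theorem pvMb_255_7 : (255:Int).testBit 7 = true := by decide
theorem pvMb_1_0 : (1:Int).testBit 0 = true := by decide
theorem pvMb_1_1 : (1:Int).testBit 1 = false := by decide
theorem pvMb_1_2 : (1:Int).testBit 2 = false := by decide
theorem pvMb_1_3 : (1:Int).testBit 3 = false := by decide
theorem pvMb_1_4 : (1:Int).testBit 4 = false := by decide
theorem pvMb_1_5 : (1:Int).testBit 5 = false := by decide
theorem pvMb_1_6 : (1:Int).testBit 6 = false := by decide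
theorem pvMb_1_7 : (1:Int).testBit 7 = false := by decide
theorem pvMb_2_0 : (2:Int).testBit 0 = false := by decide
theorem pvMb_2_1 : (2:Int).testBit 1 = true := by decide
theorem pvMb_2_2 : (2:Int).testBit 2 = false := by decide
theorem pvMb_2_3 : (2:Int).testBit 3 = false := by decide
theorem pvMb_2_4 : (2:Int).testBit 4 = false := by decide
theorem pvMb_2_5 : (2:Int).testBit 5 = false := by decide
theorem pvMb_2_6 : (2:Int).testBit 6 = false := by decide
theorem pvMb_2_7 : (2:Int).testBit 7 = false := by decide
theorem pvMb_4_0 : (4:Int).testBit 0 = false := by decide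
theorem pvMb_4_1 : (4:Int).testBit 1 = false := by decide
theorem pvMb_4_2 : (4:Int).testBit 2 = true := by decide
theorem pvMb_4_3 : (4:Int).testBit 3 = false := by decide
theorem pvMb_4_4 : (4:Int).testBit 4 = false := by decide
theorem pvMb_4_5 : (4:Int).testBit 5 = false := by decide
theorem pvMb_4_6 : (4:Int).testBit 6 = false := by decide
theorem pvMb_4_7 : (4:Int).testBit 7 = false := by decide
theorem pvMb_8_0 : (8:Int).testBit 0 = false := by decide
theorem pvMb_8_1 : (8:Int).testBit 1 = false := by decide
theorem pvMb_8_2 : (8:Int).testBit 2 = false := by decide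
theorem pvMb_8_3 : (8:Int).testBit 3 = true := by decide
theorem pvMb_8_4 : (8:Int).testBit 4 = false := by decide
theorem pvMb_8_5 : (8:Int).testBit 5 = false := by decide
theorem pvMb_8_6 : (8:Int).testBit 6 = false := by decide
theorem pvMb_8_7 : (8:Int).testBit 7 = false := by decide
theorem pvMb_16_0 : (16:Int).testBit 0 = false := by decide
theorem pvMb_16_1 : (16:Int).testBit 1 = false := by decide
theorem pvMb_16_2 : (16:Int).testBit 2 = false := by decide
theorem pvMb_16_3 : (16:Int).testBit 3 = false := by decide
theorem pvMb_16_4 : (16:Int).testBit 4 = true := by decide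
theorem pvMb_16_5 : (16:Int).testBit 5 = false := by decide
theorem pvMb_16_6 : (16:Int).testBit 6 = false := by decide
theorem pvMb_16_7 : (16:Int).testBit 7 = false := by decide
theorem pvMb_32_0 : (32:Int).testBit 0 = false := by decide
theorem pvMb_32_1 : (32:Int).testBit 1 = false := by decide
theorem pvMb_32_2 : (32:Int).testBit 2 = false := by decide
theorem pvMb_32_3 : (32:Int).testBit 3 = false := by decide
theorem pvMb_32_4 : (32:Int).testBit 4 = false := by decide
theorem pvMb_32_5 : (32:Int).testBit 5 = true := by decide
theorem pvMb_32_6 : (32:Int).testBit 6 = false := by decide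
theorem pvMb_32_7 : (32:Int).testBit 7 = false := by decide
theorem pvMb_64_0 : (64:Int).testBit 0 = false := by decide
theorem pvMb_64_1 : (64:Int).testBit 1 = false := by decide
theorem pvMb_64_2 : (64:Int).testBit 2 = false := by decide
theorem pvMb_64_3 : (64:Int).testBit 3 = false := by decide
theorem pvMb_64_4 : (64:Int).testBit 4 = false := by decide
theorem pvMb_64_5 : (64:Int).testBit 5 = false := by decide
theorem pvMb_64_6 : (64:Int).testBit 6 = true := by decide
theorem pvMb_64_7 : (64:Int).testBit 7 = false := by decide
theorem pvMb_128_0 : (128:Int).testBit 0 = false := by decide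
theorem pvMb_128_1 : (128:Int).testBit 1 = false := by decide
theorem pvMb_128_2 : (128:Int).testBit 2 = false := by decide
theorem pvMb_128_3 : (128:Int).testBit 3 = false := by decide
theorem pvMb_128_4 : (128:Int).testBit 4 = false := by decide
theorem pvMb_128_5 : (128:Int).testBit 5 = false := by decide
theorem pvMb_128_6 : (128:Int).testBit 6 = false := by decide
theorem pvMb_128_7 : (128:Int).testBit 7 = true := by decide
theorem pvShl_1 : (((1:Int)) <<< (1:Nat)) = 2 := by decide
theorem pvShl_2 : (((2:Int)) <<< (1:Nat)) = 4 := by decide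
theorem pvShl_4 : (((4:Int)) <<< (1:Nat)) = 8 := by decide
theorem pvShl_8 : (((8:Int)) <<< (1:Nat)) = 16 := by decide
theorem pvShl_16 : (((16:Int)) <<< (1:Nat)) = 32 := by decide
theorem pvShl_32 : (((32:Int)) <<< (1:Nat)) = 64 := by decide
theorem pvShl_64 : (((64:Int)) <<< (1:Nat)) = 128 := by decide

theorem pv_pyr : PySem.List.pyRange 0 8 1 = [0,1,2,3,4,5,6,7] := by decide

theorem pv_bits_eq (raw : Int) (i : Nat) :
    (extract_sub_breed_index raw).testBit i = (extract_sub_breed_index_alt raw).testBit i := by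
  by_cases h8 : i < 8
  · interval_cases i <;>
      simp [extract_sub_breed_index, extract_sub_breed_index_alt, pv_pyr, pv_tbsr, pv_tb0,
        Int.testBit_land, Int.testBit_lor, pvMb_21845_0, pvMb_21845_1, pvMb_21845_2, pvMb_21845_3, pvMb_21845_4, pvMb_21845_5, pvMb_21845_6, pvMb_21845_7, pvMb_21845_8, pvMb_21845_9, pvMb_21845_10, pvMb_21845_11, pvMb_21845_12, pvMb_21845_13, pvMb_21845_14, pvMb_13107_0, pvMb_13107_1, pvMb_13107_2, pvMb_13107_3, pvMb_13107_4, pvMb_13107_5, pvMb_13107_6, pvMb_13107_7, pvMb_13107_8, pvMb_13107_9, pvMb_13107_10, pvMb_13107_11, pvMb_13107_12, pvMb_13107_13, pvMb_3855_0, pvMb_3855_1, pvMb_3855_2, pvMb_3855_3, pvMb_3855_4, pvMb_3855_5, pvMb_3855_6, pvMb_3855_7, pvMb_3855_8, pvMb_3855_9, pvMb_3855_10, pvMb_3855_11, pvMb_255_0, pvMb_255_1, pvMb_255_2, pvMb_255_3, pvMb_255_4, pvMb_255_5, pvMb_255_6, pvMb_255_7, pvMb_1_0, pvMb_1_1, pvMb_1_2,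 pvMb_1_3, pvMb_1_4, pvMb_1_5, pvMb_1_6, pvMb_1_7, pvMb_2_0, pvMb_2_1, pvMb_2_2, pvMb_2_3, pvMb_2_4, pvMb_2_5, pvMb_2_6, pvMb_2_7, pvMb_4_0, pvMb_4_1, pvMb_4_2, pvMb_4_3, pvMb_4_4, pvMb_4_5, pvMb_4_6, pvMb_4_7, pvMb_8_0, pvMb_8_1, pvMb_8_2, pvMb_8_3, pvMb_8_4, pvMb_8_5, pvMb_8_6, pvMb_8_7, pvMb_16_0, pvMb_16_1, pvMb_16_2, pvMb_16_3, pvMb_16_4, pvMb_16_5, pvMb_16_6, pvMb_16_7, pvMb_32_0, pvMb_32_1, pvMb_32_2, pvMb_32_3, pvMb_32_4, pvMb_32_5, pvMb_32_6, pvMb_32_7, pvMb_64_0, pvMb_64_1, pvMb_64_2, pvMb_64_3, pvMb_64_4, pvMb_64_5, pvMb_64_6, pvMb_64_7, pvMb_128_0, pvMb_128_1, pvMb_128_2, pvMb_128_3, pvMb_128_4, pvMb_128_5, pvMb_128_6, pvMb_128_7, pvShl_1, pvShl_2, pvShl_4, pvShl_8, pvShl_16, pvShl_32, pvShl_64]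
  · have h255 := pv_tb255_high i (by omega)
    simp [extract_sub_breed_index, extract_sub_breed_index_alt, pv_pyr, pv_tbsr,
      Int.testBit_land, Int.testBit_lor, h255]

-- ===== VERDICT (by name: the statement is the Claim_ definition above) =====
theorem extract_sub_breed_index_spec : Claim_equal_extract_sub_breed_index := by
  intro raw _
  show extract_sub_breed_index raw = extract_sub_breed_index_alt raw
  have hA : 0 ≤ extract_sub_breed_index raw := pv_land255_nonneg _
  have hB : 0 ≤ extract_sub_breed_index_alt raw := pv_land255_nonneg _
  have hbits : ∀ i, (extract_sub_breed_index raw).toNat.testBit i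
      = (extract_sub_breed_index_alt raw).toNat.testBit i := fun i => by
    rw [pv_toNat_testBit hA, pv_toNat_testBit hB]; exact pv_bits_eq raw i
  have := Nat.eq_of_testBit_eq hbits
  omega
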